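-- pv_equiv track=rewrite | github.com/NeedtoLearn/leetcode | seven_five_five.py | searchMinRight
-- ===== SOURCE A (Python) =====
-- def searchMinRight(heights, K):
--     curMin = K
--     while K < len(heights) - 1:
--         if heights[K+1] <= heights[K]:
--             if heights[K+1] < heights[K]:
--                 curMin = K + 1
--             K += 1
--         else:
--             return curMin
--     return curMin
-- ===== SOURCE B (Python) =====
-- def searchMinRight(heights, K):
--     n = len(heights)
--     if K >= n - 1:
--         return K
--     # phase 1: find the end m of the non-increasing run starting at K
--     m = K
--     while m < n - 1 and heights[m + 1] <= heights[m]: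
--         m += 1
--     # phase 2: leftmost index in [K..m] holding the run minimum heights[m]
--     v = heights[m]
--     i = K
--     while heights[i] != v:
--         i += 1
--     return i
-- ===== Notes on version B (the rewrite author's own statement) =====
-- stated objective: alternative
-- what changed: A's single fused while-loop that tracks the last strict-decrease index is replaced by a two-phase scan: first find the end of the non-increasing run starting at K, then scan left-to-right for the leftmost index holding the run's minimum value.
import Mathlib
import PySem

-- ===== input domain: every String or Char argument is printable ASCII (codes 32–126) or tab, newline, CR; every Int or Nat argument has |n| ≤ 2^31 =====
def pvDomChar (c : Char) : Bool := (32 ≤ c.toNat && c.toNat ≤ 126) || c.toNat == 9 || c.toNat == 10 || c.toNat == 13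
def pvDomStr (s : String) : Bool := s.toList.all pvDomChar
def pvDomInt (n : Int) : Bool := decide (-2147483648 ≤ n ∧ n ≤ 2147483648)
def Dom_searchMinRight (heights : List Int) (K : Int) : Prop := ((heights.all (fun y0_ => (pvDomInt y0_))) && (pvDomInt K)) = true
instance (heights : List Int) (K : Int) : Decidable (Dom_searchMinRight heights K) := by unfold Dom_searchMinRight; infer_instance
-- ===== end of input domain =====

-- B restructures A's single fused while-loop into two phases (find the end of the
-- non-increasing run, then scan for the leftmost occurrence of the run minimum);
-- objective: alternative decomposition, same cost.

-- ===== PORT A =====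
-- A's while loop: state (K, curMin); returns curMin at the first strict increase or at the array end.
def searchMinRightLoop (heights : List Int) (K curMin : Int) : Int :=
  if _h : K < (heights.length : Int) - 1 then
    match PySem.List.pyGet? heights (K + 1), PySem.List.pyGet? heights K with
    | some a, some b =>
      if a ≤ b then
        searchMinRightLoop heights (K + 1) (if a < b then K + 1 else curMin)
      else curMin
    | _, _ => curMin   -- IndexError in Python; excluded by Pre_
  else curMin
termination_by ((heights.length : Int) - K).toNat
decreasing_by omega

def searchMinRight (heights : List Int) (K : Int) : Int :=
  searchMinRightLoop heights K K

-- ===== PORT B =====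
-- termination helper for the ports' scans (cited in decreasing_by)
theorem pyGet?_some_lt_len {α : Type} {xs : List α} {i : Int} {x : α}
    (h : PySem.List.pyGet? xs i = some x) : i < (xs.length : Int) := by
  by_contra hc
  have hn : PySem.List.pyGet? xs i = none :=
    (PySem.List.pyGet?_eq_none_iff xs i).2 (by unfold PySem.Raise.InRange; omega)
  simp [hn] at h

-- phase 1: advance m while the next element does not increase
def altRun (heights : List Int) (m : Int) : Int :=
  if _h : m < (heights.length : Int) - 1 then
    match PySem.List.pyGet? heights (m + 1), PySem.List.pyGet? heights m with
    | some a, some b => if a ≤ b then altRun heights (m + 1) else m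
    | _, _ => m   -- IndexError in Python; excluded by Pre_
  else m
termination_by ((heights.length : Int) - m).toNat
decreasing_by omega

-- phase 2: first index i (from K) with heights[i] = v
def altScan (heights : List Int) (i v : Int) : Int :=
  match h : PySem.List.pyGet? heights i with
  | some x => if x ≠ v then altScan heights (i + 1) v else i
  | none => i   -- IndexError in Python; unreachable under Pre_
termination_by ((heights.length : Int) - i).toNat
decreasing_by have := pyGet?_some_lt_len h; omega

def searchMinRight_alt (heights : List Int) (K : Int) : Int :=
  if K ≥ (heights.length : Int) - 1 then K
  else
    match PySem.List.pyGet? heights (altRun heights K) with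
    | some v => altScan heights K v
    | none => K   -- IndexError in Python; unreachable under Pre_

-- ===== PRECONDITION & SPEC =====
-- Pre_ excludes exactly the inputs on which A raises IndexError: when K < -len(heights)
-- and the loop is entered, heights[K] is out of range even after Python's negative wraparound.
def Pre_searchMinRight (heights : List Int) (K : Int) : Prop :=
  -(heights.length : Int) ≤ K ∨ (heights.length : Int) - 1 ≤ K
instance (heights : List Int) (K : Int) : Decidable (Pre_searchMinRight heights K) := by
  unfold Pre_searchMinRight; infer_instance

def pvWitness_searchMinRight : List Int × Int := ([3, 1, 1, 2], 0)

def Spec_searchMinRight (heights : List Int) (K : Int) (out : Int) : Prop := out = searchMinRight_alt heights K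
instance (heights : List Int) (K : Int) (out : Int) : Decidable (Spec_searchMinRight heights K out) := by unfold Spec_searchMinRight; infer_instance

-- ===== CLAIM (what is proved, stated in full; the proofs are below) =====
def Claim_equal_searchMinRight : Prop := ∀ (heights : List Int) (K : Int), Dom_searchMinRight heights K → Pre_searchMinRight heights K → Spec_searchMinRight heights K (searchMinRight heights K)

-- ===== LEMMAS AND PROOFS =====

-- an in-range index yields a value
theorem pyGet?_isSome_of_inRange {α : Type} (xs : List α) (i : Int)
    (h1 : -(xs.length : Int) ≤ i) (h2 : i < (xs.length : Int)) :
    ∃ x, PySem.List.pyGet? xs i = some x := by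
  cases hx : PySem.List.pyGet? xs i with
  | none =>
      exact absurd ((PySem.List.pyGet?_eq_none_iff xs i).1 hx)
        (by unfold PySem.Raise.InRange; exact fun hn => hn ⟨h1, h2⟩)
  | some x => exact ⟨x, rfl⟩


-- one unfolding step of altScan when the index is in range
theorem altScan_step (heights : List Int) (i v x : Int)
    (hx : PySem.List.pyGet? heights i = some x) :
    altScan heights i v = if x ≠ v then altScan heights (i + 1) v else i := by
  rw [altScan]
  split
  · next x' heq => rw [hx] at heq; cases heq; rfl
  · next heq => rw [hx] at heq; cases heq

-- the run end carries a value, and it is ≤ the value at the start of the run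
theorem altRun_some_le (heights : List Int) :
    ∀ (n : Nat) (K b : Int), ((heights.length : Int) - K).toNat ≤ n →
    PySem.List.pyGet? heights K = some b →
    ∃ v, PySem.List.pyGet? heights (altRun heights K) = some v ∧ v ≤ b := by
  intro n
  induction n with
  | zero =>
      intro K b hn hb
      have := pyGet?_some_lt_len hb
      omega
  | succ n ih =>
      intro K b hn hb
      rw [altRun]
      by_cases hlt : K < (heights.length : Int) - 1
      · simp only [hlt, dif_pos]
        have hbK : -(heights.length : Int) ≤ K := by
          have hnone := PySem.List.pyGet?_eq_none_iff heights K
          by_contra hc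
          have : PySem.List.pyGet? heights K = none :=
            hnone.2 (by unfold PySem.Raise.InRange; omega)
          simp [this] at hb
        obtain ⟨a, ha⟩ := pyGet?_isSome_of_inRange heights (K + 1) (by omega) (by omega)
        rw [ha, hb]
        by_cases hab : a ≤ b
        · simp only [hab, if_pos]
          obtain ⟨v, hv, hvle⟩ := ih (K + 1) a (by omega) ha
          exact ⟨v, hv, by omega⟩
        · simp only [hab, if_neg, not_false_iff]
          exact ⟨b, hb, le_refl b⟩
      · simp only [hlt, dif_neg, not_false_iff]
        exact ⟨b, hb, le_refl b⟩

-- main invariant: A's fused loop equals "curMin if no strict drop remains, else the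
-- leftmost index past K holding the run minimum"
theorem loop_eq_scan (heights : List Int) :
    ∀ (n : Nat) (K curMin b v : Int), ((heights.length : Int) - K).toNat ≤ n →
    PySem.List.pyGet? heights K = some b →
    PySem.List.pyGet? heights (altRun heights K) = some v →
    searchMinRightLoop heights K curMin =
      if b = v then curMin else altScan heights (K + 1) v := by
  intro n
  induction n with
  | zero =>
      intro K curMin b v hn hb hv
      have := pyGet?_some_lt_len hb
      omega
  | succ n ih =>
      intro K curMin b v hn hb hv
      rw [searchMinRightLoop]
      rw [altRun] at hv
      by_cases hlt : K < (heights.length : Int) - 1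
      · simp only [hlt, dif_pos] at hv ⊢
        have hbK : -(heights.length : Int) ≤ K := by
          have hnone := PySem.List.pyGet?_eq_none_iff heights K
          by_contra hc
          have : PySem.List.pyGet? heights K = none :=
            hnone.2 (by unfold PySem.Raise.InRange; omega)
          simp [this] at hb
        obtain ⟨a, ha⟩ := pyGet?_isSome_of_inRange heights (K + 1) (by omega) (by omega)
        rw [ha, hb] at hv ⊢
        by_cases hab : a ≤ b
        · simp only [hab, if_pos] at hv ⊢
          have hrec := ih (K + 1) (if a < b then K + 1 else curMin) a v (by omega) ha hv
          rw [hrec]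
          rw [altScan_step heights (K + 1) v a ha]
          by_cases hav : a = v
          · -- heights[K+1] already equals the run minimum
            subst hav
            simp only [ne_eq, not_true_eq_false, ite_false]
            by_cases hlt2 : a < b
            · have : ¬ (b = a) := by omega
              simp [hlt2, this]
            · have : b = a := by omega
              simp [this]
          · simp only [ne_eq, hav, not_false_iff, if_pos]
            by_cases hlt2 : a < b
            · -- strict drop: run minimum v ≤ a < b, so b ≠ v
              obtain ⟨v', hv', hv'le⟩ := altRun_some_le heights n (K + 1) a (by omega) ha
              have : v' = v := by rw [hv'] at hv; exact Option.some.inj hv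
              have hbv : ¬ (b = v) := by omega
              simp [hbv]
            · have hba : b = a := by omega
              subst hba
              simp [hav]
        · -- strict increase: both loop and run stop here
          simp only [hab, if_neg, not_false_iff] at hv ⊢
          have : b = v := by rw [hb] at hv; exact Option.some.inj hv
          simp [this]
      · simp only [hlt, dif_neg, not_false_iff] at hv ⊢
        have : b = v := by rw [hb] at hv; exact Option.some.inj hv
        simp [this]

-- ===== VERDICT (by name: the statement is the Claim_ definition above) =====
theorem searchMinRight_spec : Claim_equal_searchMinRight := by
  intro heights K _hDom hPre
  unfold Spec_searchMinRight searchMinRight searchMinRight_alt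
  by_cases hK : K ≥ (heights.length : Int) - 1
  · simp only [hK, if_pos]
    rw [searchMinRightLoop]
    simp only [dif_neg (by omega : ¬ K < (heights.length : Int) - 1)]
  · simp only [hK, if_neg, not_false_iff]
    have hKlo : -(heights.length : Int) ≤ K := by
      rcases hPre with h | h
      · exact h
      · omega
    obtain ⟨b, hb⟩ := pyGet?_isSome_of_inRange heights K hKlo (by omega)
    obtain ⟨v, hv, _⟩ :=
      altRun_some_le heights ((heights.length : Int) - K).toNat K b (le_refl _) hb
    rw [hv]
    rw [loop_eq_scan heights ((heights.length : Int) - K).toNat K K b v (le_refl _) hb hv]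
    have hstep := altScan_step heights K v b hb
    by_cases hbv : b = v <;> simp [hbv, hstep]
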